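-- pv_equiv track=rewrite | github.com/jsbae-RL/ROMiserables | 03151_minsuje/hw/week3(p)/study_week3_Q_ji/study_week3_A_ji_2.py | solution
-- ===== SOURCE A (Python) =====
-- from collections import deque
-- from collections import deque
--
-- def solution(s):
--   dq = deque(s)
--   count = 0                     # 몇 개의 부분으로 분해되었는지 저장하는 변수수
--
--   while dq:
--     if len(dq) == 1:            # 문자열이 처음부터 한글자거나, 한글자만 남았을 때
--       count += 1
--
--     x = dq.popleft()            # 첫번째 요소를 x에 저장(덱에서 삭제제)
--     count_x = 1                 # x 개수를 저장할 변수 초기화 (처음 하나가 있으니 1)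
--     count_a = 0                 # x와 다른 문자 개수를 저장할 변수 초기화화
--
--     while dq:
--       if x == dq[0]:            # 그 다음요소가 x와 같으면면
--         count_x += 1            # x 개수 +1
--         dq.popleft()            # 그리고 검사한 요소는 삭제제
--       else:
--         count_a += 1            # 그 다음요소가 x와 다르면면 a에 +1
--         dq.popleft()            # 그리고 검사한 요소 삭제
--
--       if count_x == count_a:    # 검사 후 x와 다른문자의 개수가 같으면
--         count += 1              # count 변수에 +1 하고 내부 반복문 탈출출
--         break
--       elif len(dq) == 0:        # 만약 개수가 다른데 문자열을 다 확인했다면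
--         count += 1              # count 변수에 +1 하여 한덩어리임을 저장장
--   return count
-- ===== SOURCE B (Python) =====
-- def solution(s):
--     count = 0
--     balance = 0
--     x = ''
--     for c in s:
--         if balance == 0:
--             x = c
--             count += 1
--         if c == x:
--             balance += 1
--         else:
--             balance -= 1
--     return count
-- ===== Notes on version B (the rewrite author's own statement) =====
-- stated objective: simpler
-- what changed: Replaced the deque with nested consume-loops and three counting sites by one flat pass over the characters keeping an integer balance and the segment's leading char, counting each segment at its start.
import Mathlib
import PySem

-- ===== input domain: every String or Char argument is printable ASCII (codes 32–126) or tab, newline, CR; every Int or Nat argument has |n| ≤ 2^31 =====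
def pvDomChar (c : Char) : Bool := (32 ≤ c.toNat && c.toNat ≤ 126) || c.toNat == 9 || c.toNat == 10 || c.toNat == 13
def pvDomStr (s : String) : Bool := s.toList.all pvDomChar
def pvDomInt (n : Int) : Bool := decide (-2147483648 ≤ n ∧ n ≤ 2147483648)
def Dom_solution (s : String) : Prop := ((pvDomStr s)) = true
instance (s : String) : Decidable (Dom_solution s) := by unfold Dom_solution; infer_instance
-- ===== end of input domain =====

-- B replaces A's deque with nested consume-loops by one flat balance-counting pass (objective: simpler).

-- ===== PORT A =====
-- inner 'while dq' loop: x fixed, counts matching (count_x) and differing (count_a) chars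
def innerA (x : Char) (dq : List Char) (cx ca count : Int) : List Char × Int :=
  match dq with
  | [] => ([], count)
  | c :: rest =>
    let cx' := if x = c then cx + 1 else cx
    let ca' := if x = c then ca else ca + 1
    if cx' = ca' then (rest, count + 1)
    else if rest.length = 0 then (rest, count + 1)
    else innerA x rest cx' ca' count

-- termination helper for outerA: the inner loop only consumes characters
theorem innerA_len_le (x : Char) (dq : List Char) (cx ca count : Int) :
    (innerA x dq cx ca count).1.length ≤ dq.length := by
  induction dq generalizing cx ca with
  | nil => simp [innerA]
  | cons c rest ih =>
    simp only [innerA]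
    split <;> split
    · simp
    · split
      · simp
      · exact le_trans (ih _ _) (by simp)
    · simp
    · split
      · simp
      · exact le_trans (ih _ _) (by simp)

-- outer 'while dq' loop
def outerA (dq : List Char) (count : Int) : Int :=
  match dq with
  | [] => count
  | x :: rest =>
    let count1 := if rest.length = 0 then count + 1 else count
    let r := innerA x rest 1 0 count1
    outerA r.1 r.2
termination_by dq.length
decreasing_by
  exact lt_of_le_of_lt (innerA_len_le _ _ _ _ _) (by simp)

def solution (s : String) : Int := outerA s.toList 0

-- ===== PORT B =====
-- one step of B's flat pass: state (count, balance, x)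
def altStep (st : Int × Int × Char) (c : Char) : Int × Int × Char :=
  let count := if st.2.1 = 0 then st.1 + 1 else st.1
  let x := if st.2.1 = 0 then c else st.2.2
  if c = x then (count, st.2.1 + 1, x) else (count, st.2.1 - 1, x)

def solution_alt (s : String) : Int := (s.toList.foldl altStep (0, 0, ' ')).1

-- ===== PRECONDITION & SPEC =====
def Spec_solution (s : String) (out : Int) : Prop := out = solution_alt s
instance (s : String) (out : Int) : Decidable (Spec_solution s out) := by unfold Spec_solution; infer_instance

-- ===== CLAIM (what is proved, stated in full; the proofs are below) =====
def Claim_equal_solution : Prop := ∀ (s : String), Dom_solution s → Spec_solution s (solution s)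

-- ===== LEMMAS AND PROOFS =====

-- one fold step of B inside an open segment (balance ≠ 0): no new count, balance moves by ±1
theorem altStep_ne (count b : Int) (x c : Char) (hb : b ≠ 0) :
    altStep (count, b, x) c = (count, if c = x then b + 1 else b - 1, x) := by
  by_cases h : c = x <;> simp [altStep, hb, h]

-- While a segment is open (balance = cx - ca ≥ 1), A's inner loop adds exactly one to count
-- (A counts the segment at its end) and B's fold resumes after the segment with balance 0.
theorem inner_corr (rest : List Char) : ∀ (x : Char) (cx ca count : Int),
    1 ≤ cx - ca → rest ≠ [] →
    (innerA x rest cx ca count).2 = count + 1 ∧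
    (List.foldl altStep (count + 1, cx - ca, x) rest).1 =
      (List.foldl altStep (count + 1, (0 : Int), x) (innerA x rest cx ca count).1).1 := by
  induction rest with
  | nil => intro x cx ca count _ h; exact absurd rfl h
  | cons c rest ih =>
    intro x cx ca count hbal _
    have hb0 : cx - ca ≠ 0 := by omega
    by_cases hxc : x = c
    · subst hxc
      have hend : ¬ (cx + 1 = ca) := by omega
      have efold : List.foldl altStep (count + 1, cx - ca, x) (x :: rest)
          = List.foldl altStep (count + 1, cx - ca + 1, x) rest := by
        rw [List.foldl_cons, altStep_ne _ _ _ _ hb0, if_pos rfl]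
      rcases rest with _ | ⟨d, rest'⟩
      · constructor
        · simp [innerA, hend]
        · rw [efold]; simp [innerA, hend, List.foldl]
      · have ihh := ih x (cx + 1) ca count (by omega) (by simp)
        have e1 : innerA x (x :: d :: rest') cx ca count
            = innerA x (d :: rest') (cx + 1) ca count := by
          simp [innerA, hend]
        rw [e1, efold, show cx - ca + 1 = cx + 1 - ca from by ring]
        exact ihh
    · have hcx : ¬ (c = x) := fun h => hxc h.symm
      have efold : List.foldl altStep (count + 1, cx - ca, x) (c :: rest)
          = List.foldl altStep (count + 1, cx - ca - 1, x) rest := by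
        rw [List.foldl_cons, altStep_ne _ _ _ _ hb0, if_neg hcx]
      by_cases heq : cx = ca + 1
      · have e1 : innerA x (c :: rest) cx ca count = (rest, count + 1) := by
          simp [innerA, hxc, heq]
        rw [e1, efold, show cx - ca - 1 = 0 from by omega]
        exact ⟨rfl, rfl⟩
      · rcases rest with _ | ⟨d, rest'⟩
        · constructor
          · simp [innerA, hxc, heq]
          · rw [efold]; simp [innerA, hxc, heq, List.foldl]
        · have ihh := ih x cx (ca + 1) count (by omega) (by simp)
          have e1 : innerA x (c :: d :: rest') cx ca count
              = innerA x (d :: rest') cx (ca + 1) count := by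
            simp [innerA, hxc, heq]
          rw [e1, efold, show cx - ca - 1 = cx - (ca + 1) from by ring]
          exact ihh

-- B's fold from a closed state (balance 0) computes A's outer loop.
theorem main_corr_n : ∀ (n : Nat) (dq : List Char), dq.length ≤ n → ∀ (count : Int) (x0 : Char),
    (List.foldl altStep (count, (0 : Int), x0) dq).1 = outerA dq count := by
  intro n
  induction n with
  | zero =>
    intro dq hlen count x0
    have hd : dq = [] := List.eq_nil_of_length_eq_zero (Nat.le_zero.mp hlen)
    subst hd; simp [List.foldl, outerA]
  | succ n ih =>
    intro dq hlen count x0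
    rcases dq with _ | ⟨x, rest⟩
    · simp [List.foldl, outerA]
    · have step : List.foldl altStep (count, (0 : Int), x0) (x :: rest)
          = List.foldl altStep (count + 1, (1 : Int), x) rest := by
        simp [List.foldl, altStep]
      rcases rest with _ | ⟨d, rest'⟩
      · rw [step]; simp [List.foldl, outerA, innerA]
      · have hic := inner_corr (d :: rest') x 1 0 count (by norm_num) (by simp)
        have hic2 := hic.2
        rw [sub_zero] at hic2
        have hlen' : (innerA x (d :: rest') 1 0 count).1.length ≤ n := by
          have h1 := innerA_len_le x (d :: rest') 1 0 count
          simp at hlen h1; omega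
        rw [step, hic2, ih _ hlen' (count + 1) x]
        conv_rhs => rw [outerA]
        simp only [List.length_cons]
        rw [if_neg (by simp), hic.1]

theorem main_corr (dq : List Char) (count : Int) (x0 : Char) :
    (List.foldl altStep (count, (0 : Int), x0) dq).1 = outerA dq count :=
  main_corr_n dq.length dq le_rfl count x0

-- ===== VERDICT (by name: the statement is the Claim_ definition above) =====
theorem solution_spec : Claim_equal_solution := by
  intro s _
  unfold Spec_solution solution solution_alt
  exact (main_corr s.toList 0 ' ').symm
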